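-- pv_equiv track=rewrite | github.com/Man0Sand/MatchesOnBarTablePython | match_grid_coordinates.py | _calculate_matches_in_rows
-- ===== SOURCE A (Python) =====
-- def _calculate_matches_in_rows(number_of_matches):
--     if not number_of_matches:
--         return []
--
--     number_of_rows = 1
--     row = 0
--     matches_in_rows = [0]
--
--     for i in range(0, number_of_matches):
--         if row != 0:
--             matches_in_rows[row] += 1
--             row -= 1
--         else:
--             if matches_in_rows[row] < 2:
--                 matches_in_rows[row] += 1
--             else:
--                 number_of_rows += 1
--                 matches_in_rows[1:] = matches_in_rows
--                 matches_in_rows[0] = 1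
--                 row = number_of_rows - 1
--     return matches_in_rows
-- ===== SOURCE B (Python) =====
-- def _calculate_matches_in_rows(number_of_matches):
--     # Find the number of full rows k (largest k with k*(k+1)/2 <= n) by an
--     # O(sqrt(n)) accumulation, then build each row count in closed form.
--     k = 0
--     t = 0
--     while t + k + 1 <= number_of_matches:
--         k += 1
--         t += k
--     j = number_of_matches - t  # extra matches spread over the top j rows
--     return [i + 1 + (1 if i >= k - j else 0) for i in range(k)]
-- ===== Notes on version B (the rewrite author's own statement) =====
-- stated objective: faster
-- what changed: Replaces A's per-match simulation (one loop iteration per match, with an O(rows) list copy at each new level) by finding the triangular level k in O(sqrt(n)) and emitting each row count from the closed-form arithmetic pattern [1..k] with the top j rows incremented.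
-- outside the precondition, e.g. on _calculate_matches_in_rows(-3): A returns [0], B returns []
import Mathlib
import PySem

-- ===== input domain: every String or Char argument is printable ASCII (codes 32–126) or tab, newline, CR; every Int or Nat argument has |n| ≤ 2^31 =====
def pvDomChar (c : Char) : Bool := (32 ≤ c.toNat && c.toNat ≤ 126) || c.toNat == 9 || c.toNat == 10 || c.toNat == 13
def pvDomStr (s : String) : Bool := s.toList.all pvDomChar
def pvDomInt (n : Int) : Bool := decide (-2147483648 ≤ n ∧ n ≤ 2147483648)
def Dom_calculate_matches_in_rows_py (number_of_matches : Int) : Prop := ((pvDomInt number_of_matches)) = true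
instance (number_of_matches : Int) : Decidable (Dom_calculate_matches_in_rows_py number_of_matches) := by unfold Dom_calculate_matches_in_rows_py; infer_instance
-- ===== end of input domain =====

-- B replaces A's one-iteration-per-match simulation by an O(sqrt(n)) triangular-level search plus a
-- closed-form row pattern; Pre_ restricts to nonnegative match counts (the function's natural domain).


-- ===== PORT A =====
-- loop body of A's `for i in range(0, number_of_matches)`; state = (number_of_rows, row, matches_in_rows)
def aStep (st : Int × Int × List Int) (_i : Int) : Int × Int × List Int :=
  let nr := st.1
  let row := st.2.1
  let m := st.2.2
  if row ≠ 0 then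
    -- matches_in_rows[row] += 1; row -= 1
    (nr, row - 1, PySem.List.pySetD m row (PySem.List.pyGetD m row 0 + 1))
  else
    if PySem.List.pyGetD m row 0 < 2 then
      -- matches_in_rows[row] += 1
      (nr, row, PySem.List.pySetD m row (PySem.List.pyGetD m row 0 + 1))
    else
      -- number_of_rows += 1; matches_in_rows[1:] = matches_in_rows; matches_in_rows[0] = 1; row = number_of_rows - 1
      let nr' := nr + 1
      let m' := PySem.List.pySetD (m.take 1 ++ m) 0 1
      (nr', nr' - 1, m')

def calculate_matches_in_rows_py (number_of_matches : Int) : List Int :=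
  if number_of_matches = 0 then []
  else
    let st := (PySem.List.pyRange 0 number_of_matches 1).foldl aStep (1, 0, [0])
    st.2.2

-- ===== PORT B =====
-- `while t + k + 1 <= number_of_matches: k += 1; t += k` (k, t stay nonnegative in B)
def bLoop (number_of_matches : Int) (k t : Nat) : Nat × Nat :=
  if (t : Int) + k + 1 ≤ number_of_matches then bLoop number_of_matches (k + 1) (t + k + 1)
  else (k, t)
termination_by number_of_matches.toNat - t
decreasing_by omega

def calculate_matches_in_rows_py_alt (number_of_matches : Int) : List Int :=
  let kt := bLoop number_of_matches 0 0
  let k := kt.1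
  let j : Int := number_of_matches - (kt.2 : Int)
  (PySem.List.pyRange 0 (k : Int) 1).map (fun i => i + 1 + (if (k : Int) - j ≤ i then 1 else 0))

-- ===== PRECONDITION & SPEC =====
-- Pre_ excludes negative match counts: a number of matches is naturally nonnegative, and there A's
-- [0] is an accident of its initial state while B returns the empty row list.
def Pre_calculate_matches_in_rows_py (number_of_matches : Int) : Prop := 0 ≤ number_of_matches
instance (number_of_matches : Int) : Decidable (Pre_calculate_matches_in_rows_py number_of_matches) := by unfold Pre_calculate_matches_in_rows_py; infer_instance
def pvWitness_calculate_matches_in_rows_py : Int := (7)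

def Spec_calculate_matches_in_rows_py (number_of_matches : Int) (out : List Int) : Prop := out = calculate_matches_in_rows_py_alt number_of_matches
instance (number_of_matches : Int) (out : List Int) : Decidable (Spec_calculate_matches_in_rows_py number_of_matches out) := by unfold Spec_calculate_matches_in_rows_py; infer_instance

-- ===== CLAIM (what is proved, stated in full; the proofs are below) =====
def Claim_equal_calculate_matches_in_rows_py : Prop := ∀ (number_of_matches : Int), Dom_calculate_matches_in_rows_py number_of_matches → Pre_calculate_matches_in_rows_py number_of_matches → Spec_calculate_matches_in_rows_py number_of_matches (calculate_matches_in_rows_py number_of_matches)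

-- ===== LEMMAS AND PROOFS =====

-- tri k = k-th triangular number, the total of a full k-row pyramid
def tri : Nat → Nat
  | 0 => 0
  | k + 1 => tri k + k + 1

-- the row list after tri k + j matches (0 ≤ j ≤ k): [1,…,k] with the top j rows incremented
def Lrow (k j : Nat) : List Int :=
  (PySem.List.pyRange 0 (k : Int) 1).map (fun i => i + 1 + (if (k : Int) - (j : Int) ≤ i then 1 else 0))

-- A's full loop state after tri k + j matches
def Sst (k j : Nat) : Int × Int × List Int := ((k : Int), ((k - 1 - j : Nat) : Int), Lrow k j)

def nextKJ (p : Nat × Nat) : Nat × Nat := if p.2 < p.1 then (p.1, p.2 + 1) else (p.1 + 1, 0)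

def KJ : Nat → Nat × Nat
  | 0 => (1, 0)
  | i + 1 => nextKJ (KJ i)

def aStepN : Nat → (Int × Int × List Int) → (Int × Int × List Int)
  | 0, st => st
  | l + 1, st => aStep (aStepN l st) 0

lemma aStepN_succ' (l : Nat) (st : Int × Int × List Int) :
    aStepN (l + 1) st = aStepN l (aStep st 0) := by
  induction l generalizing st with
  | zero => rfl
  | succ l ih =>
    show aStep (aStepN (l + 1) st) 0 = _
    rw [ih]
    rfl

lemma aStep_const (st : Int × Int × List Int) (x : Int) : aStep st x = aStep st 0 := rfl

lemma foldl_aStep (l : List Int) (st : Int × Int × List Int) :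
    l.foldl aStep st = aStepN l.length st := by
  induction l generalizing st with
  | nil => rfl
  | cons x xs ih =>
    simp only [List.foldl_cons, List.length_cons, ih, aStepN_succ', aStep_const]

lemma length_Lrow (k j : Nat) : (Lrow k j).length = k := by
  simp [Lrow, PySem.List.length_pyRange_one]

lemma getElem_Lrow (k j i : Nat) (h : i < (Lrow k j).length) :
    (Lrow k j)[i] = (i : Int) + 1 + (if (k : Int) - (j : Int) ≤ (i : Int) then 1 else 0) := by
  rw [length_Lrow] at h
  simp [Lrow, PySem.List.getElem_pyRange_one]

lemma aStep_Sst (k j : Nat) (hk : 1 ≤ k) (hj : j ≤ k) (x : Int) :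
    aStep (Sst k j) x = if j < k then Sst k (j + 1) else Sst (k + 1) 0 := by
  by_cases hrow : k - 1 - j = 0
  case neg =>
    -- row ≠ 0: one match on row `k-1-j`, row moves down
    have h1 : (((k - 1 - j : Nat) : Int)) ≠ 0 := by omega
    rw [if_pos (by omega)]
    simp only [aStep, Sst, if_pos h1, PySem.List.pyGetD_natCast, PySem.List.pySetD_natCast]
    simp only [Prod.mk.injEq]
    refine ⟨trivial, by omega, ?_⟩
    rw [List.getD_eq_getElem _ _ (by rw [length_Lrow]; omega), getElem_Lrow]
    apply List.ext_getElem (by simp [length_Lrow])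
    intro i hi1 hi2
    rw [List.getElem_set, getElem_Lrow]
    rw [length_Lrow] at hi2
    split_ifs <;> rw [getElem_Lrow] <;> split_ifs <;> omega
  case pos =>
    have h0 : (((k - 1 - j : Nat) : Int)) = 0 := by omega
    by_cases hlt : j < k
    · -- row = 0 and matches_in_rows[0] = 1 < 2: bottom row gets its second match
      rw [if_pos hlt]
      simp only [aStep, Sst, h0, ne_eq, not_true_eq_false, if_false,
        PySem.List.pyGetD_zero]
      rw [List.getD_eq_getElem _ _ (by rw [length_Lrow]; omega), getElem_Lrow]
      simp only [Nat.cast_zero]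
      rw [if_neg (show ¬((k : Int) - (j : Int) ≤ 0) by omega)]
      norm_num
      refine ⟨by omega, ?_⟩
      rw [PySem.List.pySetD_of_nonneg _ _ (by norm_num)]
      apply List.ext_getElem (by simp [length_Lrow])
      intro i hi1 hi2
      rw [length_Lrow] at hi2
      simp only [Int.toNat_zero, List.getElem_set]
      rw [getElem_Lrow]
      split_ifs <;> rw [getElem_Lrow] <;> split_ifs <;> omega
    · -- row = 0 and matches_in_rows[0] = 2: a new bottom row of 1 is prepended
      have hjk : j = k := by omega
      subst hjk
      rw [if_neg (by omega)]
      simp only [aStep, Sst, h0, ne_eq, not_true_eq_false, if_false,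
        PySem.List.pyGetD_zero]
      rw [List.getD_eq_getElem _ _ (by rw [length_Lrow]; omega), getElem_Lrow]
      simp only [Nat.cast_zero]
      rw [if_pos (show (j : Int) - (j : Int) ≤ 0 by omega)]
      rw [if_neg (show ¬((0 : Int) + 1 + 1 < 2) by norm_num)]
      simp only [Prod.mk.injEq]
      refine ⟨by push_cast; omega, by push_cast; omega, ?_⟩
      rw [PySem.List.pySetD_of_nonneg _ _ (by norm_num)]
      apply List.ext_getElem (by simp [length_Lrow]; omega)
      intro i hi1 hi2
      rw [length_Lrow] at hi2
      simp only [Int.toNat_zero, List.getElem_set]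
      rw [getElem_Lrow]
      split_ifs with hi0 h2
      · omega
      · omega
      · exfalso; omega
      · rw [List.getElem_append_right (by simp [List.length_take, length_Lrow]; omega),
          getElem_Lrow]
        simp only [List.length_take, length_Lrow]
        split_ifs <;> omega

lemma KJ_bounds (i : Nat) :
    1 ≤ (KJ i).1 ∧ (KJ i).2 ≤ (KJ i).1 ∧ i + 1 = tri (KJ i).1 + (KJ i).2 := by
  induction i with
  | zero => simp [KJ, tri]
  | succ i ih =>
    obtain ⟨h1, h2, h3⟩ := ih
    simp only [KJ, nextKJ]
    split
    · refine ⟨h1, by omega, ?_⟩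
      show i + 1 + 1 = tri (KJ i).1 + ((KJ i).2 + 1)
      omega
    · have hj : (KJ i).2 = (KJ i).1 := by omega
      refine ⟨by omega, by omega, ?_⟩
      show i + 1 + 1 = tri ((KJ i).1 + 1) + 0
      simp only [tri]
      omega

lemma aStepN_KJ (i : Nat) : aStepN (i + 1) (1, 0, [0]) = Sst (KJ i).1 (KJ i).2 := by
  induction i with
  | zero => decide
  | succ i ih =>
    obtain ⟨h1, h2, _⟩ := KJ_bounds i
    show aStep (aStepN (i + 1) (1, 0, [0])) 0 = _
    rw [ih, aStep_Sst _ _ h1 h2]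
    simp only [KJ, nextKJ]
    split <;> rfl

lemma tri_mono {a b : Nat} (h : a ≤ b) : tri a ≤ tri b := by
  induction b with
  | zero => simp [Nat.le_zero.mp h]
  | succ b ih =>
    rcases Nat.lt_or_ge a (b + 1) with hlt | hge
    · have := ih (by omega); simp [tri]; omega
    · have : a = b + 1 := by omega
      simp [this]

lemma tri_unique {k k' L : Nat} (h1 : tri k ≤ L) (h2 : L < tri k + k + 1)
    (h3 : tri k' ≤ L) (h4 : L < tri k' + k' + 1) : k = k' := by
  rcases Nat.lt_trichotomy k k' with h | h | h
  · have : tri (k + 1) ≤ tri k' := tri_mono h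
    simp [tri] at this; omega
  · exact h
  · have : tri (k' + 1) ≤ tri k := tri_mono h
    simp [tri] at this; omega

lemma bLoop_spec (n : Int) (k t : Nat) :
    t = tri k → (t : Int) ≤ n →
    ∃ k', bLoop n k t = (k', tri k') ∧ ((tri k' : Nat) : Int) ≤ n ∧ n < ((tri k' : Nat) : Int) + k' + 1 := by
  fun_induction bLoop n k t with
  | case1 k t hc ih =>
    intro ht h1
    exact ih (by simp only [tri]; omega) (by push_cast; omega)
  | case2 k t hc =>
    intro ht h1
    subst ht
    exact ⟨k, rfl, h1, by omega⟩

-- ===== VERDICT (by name: the statement is the Claim_ definition above) =====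
theorem calculate_matches_in_rows_py_spec : Claim_equal_calculate_matches_in_rows_py := by
  intro n _ hpre
  unfold Spec_calculate_matches_in_rows_py
  have hpre' : (0 : Int) ≤ n := hpre
  by_cases hn : n = 0
  · subst hn
    simp only [calculate_matches_in_rows_py, calculate_matches_in_rows_py_alt, if_pos]
    rw [bLoop]
    norm_num [PySem.List.pyRange_one_eq_nil]
  · -- n ≥ 1
    have hL : 1 ≤ n.toNat := by omega
    obtain ⟨h1, h2, h3⟩ := KJ_bounds (n.toNat - 1)
    obtain ⟨k', hb, hb1, hb2⟩ := bLoop_spec n 0 0 rfl (by omega)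
    have hLk : n.toNat = tri (KJ (n.toNat - 1)).1 + (KJ (n.toNat - 1)).2 := by omega
    have hk' : k' = (KJ (n.toNat - 1)).1 := by
      refine tri_unique (L := n.toNat) (by omega) (by omega) (by omega) (by omega)
    subst hk'
    simp only [calculate_matches_in_rows_py, calculate_matches_in_rows_py_alt, if_neg hn,
      foldl_aStep, PySem.List.length_pyRange_one, hb]
    rw [show (n - (0 : Int)).toNat = (n.toNat - 1) + 1 by omega, aStepN_KJ]
    simp only [Sst, Lrow]
    rw [show n - ((tri (KJ (n.toNat - 1)).1 : Nat) : Int) = (((KJ (n.toNat - 1)).2 : Nat) : Int) by omega]
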